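-- pv_equiv track=rewrite | github.com/Skipper126/herding | herding/envs/assets/controller/agents_workers_utils.py | get_workers_ranges
-- ===== SOURCE A (Python) =====
-- import math
--
-- def get_workers_ranges(agents_count, workers_count):
--     workers_ranges = []
--
--     j = 0
--     for i in range(workers_count):
--         workers_ranges.append([])
--         for _ in range(int(math.ceil(agents_count / workers_count))):
--             if j < agents_count:
--                 workers_ranges[i].append(j)
--                 j += 1
--             else:
--                 break
--
--     return workers_ranges
-- ===== SOURCE B (Python) =====
-- import math
--
-- def get_workers_ranges(agents_count, workers_count):
--     if workers_count == 0:
--         return []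
--     chunk = int(math.ceil(agents_count / workers_count))
--     return [list(range(i * chunk, min((i + 1) * chunk, agents_count)))
--             for i in range(workers_count)]
-- ===== Notes on version B (the rewrite author's own statement) =====
-- stated objective: simpler
-- what changed: B replaces A's running counter j with a per-element append-and-break inner loop by computing the chunk size once and emitting each worker's index slice directly as range(i*chunk, min((i+1)*chunk, agents_count)).
import Mathlib
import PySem

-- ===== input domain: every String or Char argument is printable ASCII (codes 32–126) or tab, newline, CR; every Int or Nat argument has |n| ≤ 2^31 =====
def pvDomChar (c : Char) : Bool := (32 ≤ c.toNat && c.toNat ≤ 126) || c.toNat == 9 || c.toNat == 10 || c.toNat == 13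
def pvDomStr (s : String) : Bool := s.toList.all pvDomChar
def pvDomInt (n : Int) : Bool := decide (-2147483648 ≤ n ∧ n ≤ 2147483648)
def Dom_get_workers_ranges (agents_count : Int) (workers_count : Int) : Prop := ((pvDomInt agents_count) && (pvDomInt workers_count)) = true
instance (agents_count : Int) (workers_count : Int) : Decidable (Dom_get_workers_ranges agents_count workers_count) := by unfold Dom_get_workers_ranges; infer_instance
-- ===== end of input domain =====

-- B derives each worker's index slice by arithmetic chunk boundaries instead of A's running
-- counter with a per-element append-and-break inner loop (objective: simpler).

-- ===== PORT A =====
-- inner loop: 'for _ in range(chunk): if j < a: append j; j += 1 else: break'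
def gwrInner : Nat → Int → Int → List Int × Int
  | 0, j, _ => ([], j)
  | n + 1, j, a =>
    if j < a then
      let r := gwrInner n (j + 1) a
      (j :: r.1, r.2)
    else ([], j)

-- one outer-loop iteration; chunk = int(math.ceil(agents_count / workers_count)):
-- exact integer ceiling, which Python's float ceil equals for |n| ≤ 2^31 (the stated domain)
def gwrStep (agents_count workers_count : Int) (st : List (List Int) × Int) (_i : Int) :
    List (List Int) × Int :=
  let chunk : Int := -(PySem.Int.floordiv (-agents_count) workers_count)
  let r := gwrInner chunk.toNat st.2 agents_count
  (st.1 ++ [r.1], r.2)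

def get_workers_ranges (agents_count : Int) (workers_count : Int) : List (List Int) :=
  ((PySem.List.pyRange 0 workers_count 1).foldl (gwrStep agents_count workers_count)
    ([], 0)).1

-- ===== PORT B =====
def get_workers_ranges_alt (agents_count : Int) (workers_count : Int) : List (List Int) :=
  if workers_count = 0 then []
  else
    let chunk : Int := -(PySem.Int.floordiv (-agents_count) workers_count)
    (PySem.List.pyRange 0 workers_count 1).map
      (fun i => PySem.List.pyRange (i * chunk) (min ((i + 1) * chunk) agents_count) 1)

-- ===== PRECONDITION & SPEC =====
def Spec_get_workers_ranges (agents_count : Int) (workers_count : Int) (out : List (List Int)) : Prop := out = get_workers_ranges_alt agents_count workers_count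
instance (agents_count : Int) (workers_count : Int) (out : List (List Int)) : Decidable (Spec_get_workers_ranges agents_count workers_count out) := by unfold Spec_get_workers_ranges; infer_instance

-- ===== CLAIM (what is proved, stated in full; the proofs are below) =====
def Claim_equal_get_workers_ranges : Prop := ∀ (agents_count : Int) (workers_count : Int), Dom_get_workers_ranges agents_count workers_count → Spec_get_workers_ranges agents_count workers_count (get_workers_ranges agents_count workers_count)

-- ===== LEMMAS AND PROOFS =====

lemma gwrInner_eq (a : Int) : ∀ (n : Nat) (j : Int),
    gwrInner n j a =
      (PySem.List.pyRange j (max j (min (j + (n : Int)) a)) 1, max j (min (j + (n : Int)) a)) := by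
  intro n
  induction n with
  | zero =>
    intro j
    have hm : max j (min (j + ((0 : Nat) : Int)) a) = j := by push_cast; omega
    rw [hm]
    simp [gwrInner, PySem.List.pyRange_one_eq_nil (le_refl j)]
  | succ n ih =>
    intro j
    by_cases h : j < a
    · have hm : max j (min (j + ((n + 1 : Nat) : Int)) a)
          = max (j + 1) (min (j + 1 + (n : Int)) a) := by push_cast; omega
      have hcons : PySem.List.pyRange j (max (j + 1) (min (j + 1 + (n : Int)) a)) 1
          = j :: PySem.List.pyRange (j + 1) (max (j + 1) (min (j + 1 + (n : Int)) a)) 1 :=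
        PySem.List.pyRange_one_cons (by omega)
      simp only [gwrInner, if_pos h, ih (j + 1), hm, hcons]
    · have hm : max j (min (j + ((n + 1 : Nat) : Int)) a) = j := by push_cast; omega
      rw [gwrInner, if_neg h, hm]
      simp [PySem.List.pyRange_one_eq_nil (le_refl j)]

lemma outer_fold (a w : Int) (_hw : 0 < w)
    (hpos : 0 < a → 1 ≤ -(PySem.Int.floordiv (-a) w))
    (hnp : a ≤ 0 → -(PySem.Int.floordiv (-a) w) ≤ 0) :
    ∀ (n : Nat) (i : Int) (acc : List (List Int)) (j : Int),
      (w - i).toNat = n → 0 ≤ i →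
      j = max 0 (min (i * -(PySem.Int.floordiv (-a) w)) a) →
      ((PySem.List.pyRange i w 1).foldl (gwrStep a w) (acc, j)).1
        = acc ++ (PySem.List.pyRange i w 1).map
            (fun k => PySem.List.pyRange (k * -(PySem.Int.floordiv (-a) w))
              (min ((k + 1) * -(PySem.Int.floordiv (-a) w)) a) 1) := by
  set c : Int := -(PySem.Int.floordiv (-a) w) with hc
  intro n
  induction n with
  | zero =>
    intro i acc j hn _ _
    have hle : w ≤ i := by omega
    simp [PySem.List.pyRange_one_eq_nil hle]
  | succ n ih =>
    intro i acc j hn hi hj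
    have hiw : i < w := by omega
    rw [PySem.List.pyRange_one_cons hiw]
    -- value of one step
    have hct : (c.toNat : Int) = max c 0 := by omega
    have hstep : gwrStep a w (acc, j) i
        = (acc ++ [PySem.List.pyRange (i * c) (min ((i + 1) * c) a) 1],
           max 0 (min ((i + 1) * c) a)) := by
      have hmul : (i + 1) * c = i * c + c := by ring
      by_cases ha : 0 < a
      · have hc1 : 1 ≤ c := hpos ha
        have hic : 0 ≤ i * c := mul_nonneg hi (by omega)
        by_cases hle : i * c ≤ a
        · have hjv : j = i * c := by omega
          have hm : max j (min (j + (c.toNat : Int)) a) = min ((i + 1) * c) a := by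
            rw [hjv, hct, hmul]; omega
          have h4 : max 0 (min ((i + 1) * c) a) = min ((i + 1) * c) a := by rw [hmul]; omega
          simp only [gwrStep, gwrInner_eq, hm, ← hc, h4]
          rw [hjv]
        · have hjv : j = a := by omega
          have h2 : PySem.List.pyRange (i * c) (min ((i + 1) * c) a) 1 = [] :=
            PySem.List.pyRange_one_eq_nil (by rw [hmul]; omega)
          have h3 : max 0 (min ((i + 1) * c) a) = a := by rw [hmul]; omega
          simp only [gwrStep, gwrInner_eq, ← hc, h2, h3, hjv]
          have hm : max a (min (a + (c.toNat : Int)) a) = a := by omega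
          rw [hm, PySem.List.pyRange_one_eq_nil (le_refl a)]
      · have ha' : a ≤ 0 := by omega
        have hc0 : c ≤ 0 := hnp ha'
        have hic : i * c ≤ 0 := mul_nonpos_of_nonneg_of_nonpos hi hc0
        have hjv : j = 0 := by omega
        have h2 : PySem.List.pyRange (i * c) (min ((i + 1) * c) a) 1 = [] :=
          PySem.List.pyRange_one_eq_nil (by rw [hmul]; omega)
        have h3 : max 0 (min ((i + 1) * c) a) = 0 := by rw [hmul]; omega
        simp only [gwrStep, gwrInner_eq, ← hc, h2, h3, hjv]
        have hm : max (0:Int) (min (0 + (c.toNat : Int)) a) = 0 := by omega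
        rw [hm, PySem.List.pyRange_one_eq_nil (le_refl 0)]
    rw [List.foldl_cons, hstep,
        ih (i + 1) (acc ++ [PySem.List.pyRange (i * c) (min ((i + 1) * c) a) 1])
          (max 0 (min ((i + 1) * c) a)) (by omega) (by omega) rfl]
    simp

-- ===== VERDICT (by name: the statement is the Claim_ definition above) =====
theorem get_workers_ranges_spec : Claim_equal_get_workers_ranges := by
  intro a w _hdom
  unfold Spec_get_workers_ranges get_workers_ranges get_workers_ranges_alt
  by_cases hw : 0 < w
  · have hwne : ¬ (w = 0) := by omega
    have hdp : PySem.Int.floordiv (-a) w = (-a) / w := PySem.Int.floordiv_eq_ediv_of_pos hw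
    have hpos : 0 < a → 1 ≤ -(PySem.Int.floordiv (-a) w) := by
      intro ha
      have : (-a) / w < 0 := Int.ediv_neg_of_neg_of_pos (by omega) hw
      omega
    have hnp : a ≤ 0 → -(PySem.Int.floordiv (-a) w) ≤ 0 := by
      intro ha
      have : 0 ≤ (-a) / w := Int.ediv_nonneg (by omega) (by omega)
      omega
    rw [outer_fold a w hw hpos hnp (w - 0).toNat 0 [] 0 rfl (le_refl 0) (by omega)]
    simp [hwne]
  · have hle : w ≤ 0 := by omega
    rcases eq_or_lt_of_le hle with h0 | hlt
    · subst h0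
      simp [PySem.List.pyRange_one_eq_nil (le_refl 0)]
    · have hne : ¬ (w = 0) := by omega
      simp [hne, PySem.List.pyRange_one_eq_nil (le_of_lt hlt)]
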